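-- pv_equiv track=rewrite | github.com/nuoxoxo/coding-quest | 15_asteroid.py | way1
-- ===== SOURCE A (Python) =====
-- def way1(G) -> int:
--     dr=[-1,0,1, 0]
--     dc=[ 0,1,0,-1]
--     R, C = len(G), len(G[0])
--     seen=set()
--     res = 0
--     N = 0
--     def DFS(r,c,current) -> int:
--         if -1 < r < R and -1 < c < C and G[r][c] != 0 and (r,c) not in seen:
--             seen.add( (r,c) )
--             current += G[r][c]
--             for i in range(4):
--                 current = DFS(r + dr[i], c + dc[i], current)
--         return current
--     for r in range(R):
--         for c in range(C):
--             if G[r][c] != 0 and (r,c) not in seen: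
--                 res += DFS(r, c, 0)
--                 N += 1
--     return res//N
-- ===== SOURCE B (Python) =====
-- def way1(G) -> int:
--     R, C = len(G), len(G[0])
--     total = 0
--     for r in range(R):
--         for c in range(C):
--             total += G[r][c]
--     seen = set()
--     count = 0
--     for r in range(R):
--         for c in range(C):
--             if G[r][c] != 0 and (r, c) not in seen:
--                 count += 1
--                 stack = [(r, c)]
--                 while stack:
--                     cr, cc = stack.pop()
--                     if G[cr][cc] != 0 and (cr, cc) not in seen:
--                         seen.add((cr, cc))
--                         for nr, nc in ((cr, cc - 1), (cr + 1, cc), (cr, cc + 1), (cr - 1, cc)):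
--                             if 0 <= nr < R and 0 <= nc < C:
--                                 stack.append((nr, nc))
--     return total // count
-- ===== Notes on version B (the rewrite author's own statement) =====
-- stated objective: simpler
-- what changed: A interleaves summing and component discovery in one recursive DFS that threads a running 'current' accumulator through nested recursive calls; B instead computes the grid total in one flat pass (zeros contribute 0) and counts components separately with an iterative stack-based flood fill that keeps no per-component sums.
import Mathlib
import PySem

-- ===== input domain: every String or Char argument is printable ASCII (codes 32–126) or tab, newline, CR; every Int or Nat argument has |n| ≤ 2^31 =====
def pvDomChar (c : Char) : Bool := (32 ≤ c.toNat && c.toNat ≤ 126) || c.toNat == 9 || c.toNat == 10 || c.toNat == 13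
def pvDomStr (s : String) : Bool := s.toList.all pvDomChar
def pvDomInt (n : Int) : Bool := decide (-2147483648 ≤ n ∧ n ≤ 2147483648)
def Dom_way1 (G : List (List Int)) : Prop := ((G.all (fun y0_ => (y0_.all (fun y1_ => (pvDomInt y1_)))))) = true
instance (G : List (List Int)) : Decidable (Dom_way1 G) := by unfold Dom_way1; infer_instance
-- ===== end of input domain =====

-- B separates the work A interleaves: one flat pass sums every cell, and components are
-- counted by an iterative stack flood fill instead of A's sum-accumulating recursive DFS.
-- Objective: simpler (no recursion, no per-component sums); not claimed faster.

-- ===== PORT A =====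
-- cell value G[r][c]; A only reads it under the guards 0 ≤ r < len G, 0 ≤ c ≤ row length
def pvGv (G : List (List Int)) (r c : Int) : Int := (G.getD r.toNat []).getD c.toNat 0

-- A's dr/dc direction tables, paired
def pvDirs : List (Int × Int) := [(-1, 0), (0, 1), (1, 0), (0, -1)]

-- A's recursive DFS; `seen` and `current` are threaded as state; fuel bounds the
-- recursion depth (R*C+1 always suffices: each nested level has grown `seen`)
def pvDfsA (G : List (List Int)) (R C : Int) :
    Nat → Int → Int → Int → PySem.Set (Int × Int) → Int × PySem.Set (Int × Int)
  | 0, _, _, cur, seen => (cur, seen)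
  | fuel + 1, r, c, cur, seen =>
    if -1 < r ∧ r < R ∧ -1 < c ∧ c < C ∧ pvGv G r c ≠ 0 ∧ (r, c) ∉ seen then
      pvDirs.foldl (fun st d => pvDfsA G R C fuel (r + d.1) (c + d.2) st.1 st.2)
        (cur + pvGv G r c, PySem.Set.add seen (r, c))
    else (cur, seen)

def way1 (G : List (List Int)) : Int :=
  let R : Int := G.length
  let C : Int := (G.headD []).length
  let fuelA : Nat := G.length * (G.headD []).length + 1
  let st :=
    (PySem.List.pyRange 0 R 1).foldl (fun st r =>
      (PySem.List.pyRange 0 C 1).foldl (fun (st : Int × Int × PySem.Set (Int × Int)) c =>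
        if pvGv G r c ≠ 0 ∧ (r, c) ∉ st.2.2 then
          let q := pvDfsA G R C fuelA r c 0 st.2.2
          (st.1 + q.1, st.2.1 + 1, q.2)
        else st) st)
      ((0 : Int), (0 : Int), ([] : PySem.Set (Int × Int)))
  PySem.Int.floordiv st.1 st.2.1

-- ===== PORT B =====
-- Source B's while loop over the explicit stack (Python list: append/pop at the end = head here);
-- fuel bounds the number of iterations (5*R*C+2 always suffices: each valid pop grows `seen`
-- and pushes at most 4, each invalid pop shrinks the stack)
def pvDrain (G : List (List Int)) (R C : Int) :
    Nat → List (Int × Int) → PySem.Set (Int × Int) → PySem.Set (Int × Int)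
  | _, [], seen => seen
  | 0, _ :: _, seen => seen
  | fuel + 1, p :: rest, seen =>
    if pvGv G p.1 p.2 ≠ 0 ∧ p ∉ seen then
      pvDrain G R C fuel
        ([(p.1, p.2 - 1), (p.1 + 1, p.2), (p.1, p.2 + 1), (p.1 - 1, p.2)].foldl
          (fun st q => if 0 ≤ q.1 ∧ q.1 < R ∧ 0 ≤ q.2 ∧ q.2 < C then q :: st else st) rest)
        (PySem.Set.add seen p)
    else pvDrain G R C fuel rest seen

def way1_alt (G : List (List Int)) : Int :=
  let R : Int := G.length
  let C : Int := (G.headD []).length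
  let total :=
    (PySem.List.pyRange 0 R 1).foldl (fun t r =>
      (PySem.List.pyRange 0 C 1).foldl (fun t c => t + pvGv G r c) t) (0 : Int)
  let fuelB : Nat := 5 * (G.length * (G.headD []).length) + 2
  let st :=
    (PySem.List.pyRange 0 R 1).foldl (fun st r =>
      (PySem.List.pyRange 0 C 1).foldl (fun (st : Int × PySem.Set (Int × Int)) c =>
        if pvGv G r c ≠ 0 ∧ (r, c) ∉ st.2 then
          (st.1 + 1, pvDrain G R C fuelB [(r, c)] st.2)
        else st) st)
      ((0 : Int), ([] : PySem.Set (Int × Int)))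
  PySem.Int.floordiv total st.1

-- ===== PRECONDITION & SPEC =====
-- Pre_ excludes exactly the inputs where the Python A raises: the empty grid (IndexError on
-- G[0]), grids with a row shorter than the first row (IndexError in the scan), and grids
-- with no nonzero cell in the first len(G[0]) columns (ZeroDivisionError).
def Pre_way1 (G : List (List Int)) : Prop :=
  G ≠ [] ∧ (∀ row ∈ G, (G.headD []).length ≤ row.length) ∧
  ∃ row ∈ G, ∃ x ∈ row.take (G.headD []).length, x ≠ 0
instance (G : List (List Int)) : Decidable (Pre_way1 G) := by unfold Pre_way1; infer_instance

def pvWitness_way1 : List (List Int) := [[1, 0], [0, 2]]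

def Spec_way1 (G : List (List Int)) (out : Int) : Prop := out = way1_alt G
instance (G : List (List Int)) (out : Int) : Decidable (Spec_way1 G out) := by unfold Spec_way1; infer_instance

-- ===== CLAIM (what is proved, stated in full; the proofs are below) =====
def Claim_equal_way1 : Prop := ∀ (G : List (List Int)), Dom_way1 G → Pre_way1 G → Spec_way1 G (way1 G)

-- ===== LEMMAS AND PROOFS =====

-- region membership as a Bool
def pvInB (R C : Int) (p : Int × Int) : Bool :=
  decide (0 ≤ p.1 ∧ p.1 < R ∧ 0 ≤ p.2 ∧ p.2 < C)

-- all grid cells, row-major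
def pvRegion (R C : Int) : List (Int × Int) :=
  (PySem.List.pyRange 0 R 1).flatMap fun r => (PySem.List.pyRange 0 C 1).map fun c => (r, c)

-- number of grid cells not yet in `seen`
def pvUnseen (R C : Int) (seen : List (Int × Int)) : Nat :=
  (pvRegion R C).countP fun p => !(decide (p ∈ seen))

def pvSumG (G : List (List Int)) (l : List (Int × Int)) : Int :=
  (l.map (fun p => pvGv G p.1 p.2)).sum

-- what one DFS/flood call does to the state: appends a block of fresh nonzero in-region cells
-- and adds exactly their values
def pvDfsSpec (G : List (List Int)) (R C : Int) (cur : Int) (seen : PySem.Set (Int × Int))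
    (res : Int × PySem.Set (Int × Int)) : Prop :=
  ∃ new, res = (cur + pvSumG G new, seen ++ new) ∧
    (∀ p ∈ new, pvInB R C p = true ∧ pvGv G p.1 p.2 ≠ 0 ∧ p ∉ seen) ∧
    (seen.Nodup → (seen ++ new).Nodup)

theorem mem_pvRegion (R C : Int) (p : Int × Int) : p ∈ pvRegion R C ↔ pvInB R C p = true := by
  obtain ⟨a, b⟩ := p
  simp [pvRegion, List.mem_flatMap, List.mem_map, PySem.List.mem_pyRange_one, pvInB]
  tauto

theorem nodup_pvRegion (R C : Int) : (pvRegion R C).Nodup := by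
  have h : pvRegion R C = (PySem.List.pyRange 0 R 1) ×ˢ (PySem.List.pyRange 0 C 1) := rfl
  rw [h]
  exact List.Nodup.product (PySem.List.nodup_pyRange_one _ _) (PySem.List.nodup_pyRange_one _ _)

theorem length_pvRegion (R C : Int) : (pvRegion R C).length = R.toNat * C.toNat := by
  simp [pvRegion, List.length_flatMap, PySem.List.length_pyRange_one]

theorem pvUnseen_le (R C : Int) (seen : List (Int × Int)) :
    pvUnseen R C seen ≤ R.toNat * C.toNat := by
  calc pvUnseen R C seen ≤ (pvRegion R C).length := List.countP_le_length
    _ = R.toNat * C.toNat := length_pvRegion R C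

theorem pvUnseen_mono (R C : Int) (seen ext : List (Int × Int)) :
    pvUnseen R C (seen ++ ext) ≤ pvUnseen R C seen := by
  apply List.countP_mono_left
  intro p _ hp
  simp only [Bool.not_eq_eq_eq_not, Bool.not_true, decide_eq_false_iff_not] at *
  intro hmem
  exact hp (List.mem_append_left _ hmem)

theorem pvUnseen_pos (R C : Int) (seen : List (Int × Int)) (p : Int × Int)
    (hp : pvInB R C p = true) (hn : p ∉ seen) : 0 < pvUnseen R C seen := by
  exact List.countP_pos_iff.2 ⟨p, (mem_pvRegion R C p).2 hp, by simpa using hn⟩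

theorem pvCountP_snoc {p : Int × Int} {seen : List (Int × Int)} (hnp : p ∉ seen) :
    ∀ (l : List (Int × Int)), l.Nodup → p ∈ l →
    (l.countP fun x => !decide (x ∈ seen ++ [p])) + 1 = l.countP fun x => !decide (x ∈ seen) := by
  intro l
  induction l with
  | nil => intro _ h; cases h
  | cons a t ih =>
    intro hnd hm
    obtain ⟨hat, hndt⟩ := List.nodup_cons.1 hnd
    rw [List.countP_cons, List.countP_cons]
    rcases List.mem_cons.1 hm with rfl | hmt
    · have hc : List.countP (fun x => !decide (x ∈ seen ++ [p])) t = List.countP (fun x => !decide (x ∈ seen)) t := by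
        apply List.countP_congr
        intro x hx
        have hxa : x ≠ p := fun h => hat (h ▸ hx)
        simp [List.mem_append, hxa]
      have h1 : (!decide (p ∈ seen ++ [p])) = false := by simp
      have h2 : (!decide (p ∈ seen)) = true := by simpa using hnp
      rw [hc, h1, h2]
      simp
    · have hap : a ≠ p := fun h => hat (h ▸ hmt)
      have he : (!decide (a ∈ seen ++ [p])) = (!decide (a ∈ seen)) := by
        simp [List.mem_append, hap]
      rw [he]
      have := ih hndt hmt
      omega

theorem pvUnseen_snoc (R C : Int) (seen : List (Int × Int)) (p : Int × Int)
    (hp : pvInB R C p = true) (hn : p ∉ seen) :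
    pvUnseen R C (seen ++ [p]) + 1 = pvUnseen R C seen := by
  exact pvCountP_snoc hn (pvRegion R C) (nodup_pvRegion R C) ((mem_pvRegion R C p).2 hp)

theorem pvDfsSpec_rfl (G : List (List Int)) (R C : Int) (cur : Int)
    (seen : PySem.Set (Int × Int)) : pvDfsSpec G R C cur seen (cur, seen) := by
  refine ⟨[], ?_, ?_, ?_⟩ <;> simp [pvSumG]

theorem pvDfsSpec_comp (G : List (List Int)) (R C : Int) (cur : Int)
    (seen : PySem.Set (Int × Int)) (res res' : Int × PySem.Set (Int × Int))
    (h1 : pvDfsSpec G R C cur seen res) (h2 : pvDfsSpec G R C res.1 res.2 res') :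
    pvDfsSpec G R C cur seen res' := by
  obtain ⟨n1, e1, g1, d1⟩ := h1
  obtain ⟨n2, e2, g2, d2⟩ := h2
  refine ⟨n1 ++ n2, ?_, ?_, ?_⟩
  · rw [e2, e1]
    simp [pvSumG, List.map_append, List.sum_append, add_assoc, List.append_assoc]
  · intro q hq
    rcases List.mem_append.1 hq with h | h
    · exact g1 q h
    · obtain ⟨hb, hg, hns⟩ := g2 q h
      rw [e1] at hns
      simp only [List.mem_append] at hns
      exact ⟨hb, hg, fun hc => hns (Or.inl hc)⟩
  · intro hnd
    have hd1 : (seen ++ n1).Nodup := d1 hnd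
    have hd2 : (res.2 ++ n2).Nodup := by
      apply d2
      rw [e1]
      exact hd1
    rw [e1] at hd2
    simpa [List.append_assoc] using hd2

-- step function of the 4-direction fold inside pvDfsA
def pvStepA (G : List (List Int)) (R C : Int) (fuel : Nat)
    (st : Int × PySem.Set (Int × Int)) (q : Int × Int) : Int × PySem.Set (Int × Int) :=
  pvDfsA G R C fuel q.1 q.2 st.1 st.2

theorem pvDfsA_skip (G : List (List Int)) (R C : Int) (fuel : Nat) (r c cur : Int)
    (seen : PySem.Set (Int × Int))
    (h : ¬(-1 < r ∧ r < R ∧ -1 < c ∧ c < C ∧ pvGv G r c ≠ 0 ∧ (r, c) ∉ seen)) :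
    pvDfsA G R C fuel r c cur seen = (cur, seen) := by
  cases fuel with
  | zero => rfl
  | succ f =>
    simp only [pvDfsA]
    rw [if_neg h]

theorem pvDfsA_step (G : List (List Int)) (R C : Int) (k : Nat) (r c cur : Int)
    (seen : PySem.Set (Int × Int)) (h1 : pvInB R C (r, c) = true) (h2 : pvGv G r c ≠ 0)
    (h3 : (r, c) ∉ seen) :
    pvDfsA G R C (k + 1) r c cur seen =
      (pvDirs.map (fun d => (r + d.1, c + d.2))).foldl (pvStepA G R C k)
        (cur + pvGv G r c, seen ++ [(r, c)]) := by
  simp only [pvInB, decide_eq_true_eq] at h1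
  simp only [pvDfsA]
  rw [if_pos ⟨by omega, by omega, by omega, by omega, h2, h3⟩]
  rw [PySem.Set.add_of_not_mem h3, List.foldl_map]
  rfl

theorem pvFoldA_spec (G : List (List Int)) (R C : Int) (fuel : Nat)
    (h : ∀ r c cur seen, pvDfsSpec G R C cur seen (pvDfsA G R C fuel r c cur seen))
    (qs : List (Int × Int)) : ∀ cur seen,
    pvDfsSpec G R C cur seen (qs.foldl (pvStepA G R C fuel) (cur, seen)) := by
  induction qs with
  | nil =>
    intro cur seen
    exact pvDfsSpec_rfl G R C cur seen
  | cons q qs ih =>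
    intro cur seen
    have h1 := h q.1 q.2 cur seen
    have h2 := ih (pvDfsA G R C fuel q.1 q.2 cur seen).1 (pvDfsA G R C fuel q.1 q.2 cur seen).2
    exact pvDfsSpec_comp G R C cur seen _ _ h1 h2

theorem pvDfsA_spec (G : List (List Int)) (R C : Int) (fuel : Nat) :
    ∀ r c cur seen, pvDfsSpec G R C cur seen (pvDfsA G R C fuel r c cur seen) := by
  induction fuel with
  | zero =>
    intro r c cur seen
    exact pvDfsSpec_rfl G R C cur seen
  | succ k ih =>
    intro r c cur seen
    by_cases hc : -1 < r ∧ r < R ∧ -1 < c ∧ c < C ∧ pvGv G r c ≠ 0 ∧ (r, c) ∉ seen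
    · obtain ⟨b1, b2, b3, b4, hg, hn⟩ := hc
      have hb : pvInB R C (r, c) = true := by
        simp only [pvInB, decide_eq_true_eq]
        exact ⟨by omega, by omega, by omega, by omega⟩
      rw [pvDfsA_step G R C k r c cur seen hb hg hn]
      have spec1 : pvDfsSpec G R C cur seen (cur + pvGv G r c, seen ++ [(r, c)]) := by
        refine ⟨[(r, c)], by simp [pvSumG], ?_, ?_⟩
        · intro p hp
          simp only [List.mem_singleton] at hp
          subst hp
          exact ⟨hb, hg, hn⟩
        · intro hnd
          simp only [List.nodup_append, hnd, List.nodup_singleton, true_and]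
          intro a ha b hb2
          simp only [List.mem_singleton] at hb2
          subst hb2
          intro h
          rw [h] at ha
          exact hn ha
      have spec2 := pvFoldA_spec G R C k ih (pvDirs.map (fun d => (r + d.1, c + d.2)))
        (cur + pvGv G r c) (seen ++ [(r, c)])
      exact pvDfsSpec_comp G R C cur seen _ _ spec1 spec2
    · rw [pvDfsA_skip G R C (k + 1) r c cur seen hc]
      exact pvDfsSpec_rfl G R C cur seen

theorem pvDfsA_oob (G : List (List Int)) (R C : Int) (fuel : Nat) (r c cur : Int)
    (seen : PySem.Set (Int × Int)) (h : pvInB R C (r, c) = false) :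
    pvDfsA G R C fuel r c cur seen = (cur, seen) := by
  apply pvDfsA_skip
  simp only [pvInB, decide_eq_false_iff_not] at h
  intro hc
  exact h ⟨by omega, by omega, by omega, by omega⟩

theorem pvDfsA_mem_self (G : List (List Int)) (R C : Int) (fuel : Nat) (r c cur : Int)
    (seen : PySem.Set (Int × Int)) (hf : 0 < fuel) (hb : pvInB R C (r, c) = true)
    (hg : pvGv G r c ≠ 0) (hn : (r, c) ∉ seen) :
    (r, c) ∈ (pvDfsA G R C fuel r c cur seen).2 := by
  cases fuel with
  | zero => omega
  | succ k =>
    rw [pvDfsA_step G R C k r c cur seen hb hg hn]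
    obtain ⟨new, e, -, -⟩ := pvFoldA_spec G R C k (pvDfsA_spec G R C k)
      (pvDirs.map (fun d => (r + d.1, c + d.2))) (cur + pvGv G r c) (seen ++ [(r, c)])
    rw [e]
    simp

theorem pvFoldA_shift (G : List (List Int)) (R C : Int) (k : Nat)
    (h : ∀ r c cur seen, pvDfsA G R C k r c cur seen =
      ((pvDfsA G R C k r c 0 seen).1 + cur, (pvDfsA G R C k r c 0 seen).2))
    (qs : List (Int × Int)) : ∀ (a b : Int) (seen : PySem.Set (Int × Int)),
    qs.foldl (pvStepA G R C k) (a + b, seen) =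
      ((qs.foldl (pvStepA G R C k) (a, seen)).1 + b, (qs.foldl (pvStepA G R C k) (a, seen)).2) := by
  induction qs with
  | nil => intro a b seen; rfl
  | cons q qs ih =>
    intro a b seen
    rw [List.foldl_cons, List.foldl_cons]
    simp only [pvStepA]
    rw [h q.1 q.2 (a + b) seen, h q.1 q.2 a seen]
    rw [show (pvDfsA G R C k q.1 q.2 0 seen).1 + (a + b) =
      ((pvDfsA G R C k q.1 q.2 0 seen).1 + a) + b by ring]
    exact ih ((pvDfsA G R C k q.1 q.2 0 seen).1 + a) b (pvDfsA G R C k q.1 q.2 0 seen).2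

-- the result is the cur-free result, shifted
theorem pvDfsA_shift (G : List (List Int)) (R C : Int) (fuel : Nat) :
    ∀ r c cur seen, pvDfsA G R C fuel r c cur seen =
      ((pvDfsA G R C fuel r c 0 seen).1 + cur, (pvDfsA G R C fuel r c 0 seen).2) := by
  induction fuel with
  | zero => intro r c cur seen; simp [pvDfsA]
  | succ k ih =>
    intro r c cur seen
    by_cases hc : -1 < r ∧ r < R ∧ -1 < c ∧ c < C ∧ pvGv G r c ≠ 0 ∧ (r, c) ∉ seen
    · obtain ⟨b1, b2, b3, b4, hg, hn⟩ := hc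
      have hb : pvInB R C (r, c) = true := by
        simp only [pvInB, decide_eq_true_eq]
        exact ⟨by omega, by omega, by omega, by omega⟩
      rw [pvDfsA_step G R C k r c cur seen hb hg hn, pvDfsA_step G R C k r c 0 seen hb hg hn]
      rw [show cur + pvGv G r c = pvGv G r c + cur by ring]
      rw [pvFoldA_shift G R C k ih _ (pvGv G r c) cur (seen ++ [(r, c)])]
      rw [show (0 : Int) + pvGv G r c = pvGv G r c by ring]
    · rw [pvDfsA_skip G R C (k + 1) r c cur seen hc, pvDfsA_skip G R C (k + 1) r c 0 seen hc]
      simp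

theorem pvFoldA_congr (G : List (List Int)) (R C : Int) (f g : Nat)
    (h : ∀ r c cur seen, pvUnseen R C seen < f → pvUnseen R C seen < g →
      pvDfsA G R C f r c cur seen = pvDfsA G R C g r c cur seen)
    (qs : List (Int × Int)) : ∀ cur seen, pvUnseen R C seen < f → pvUnseen R C seen < g →
    qs.foldl (pvStepA G R C f) (cur, seen) = qs.foldl (pvStepA G R C g) (cur, seen) := by
  induction qs with
  | nil => intro cur seen _ _; rfl
  | cons q qs ih =>
    intro cur seen hf hg
    rw [List.foldl_cons, List.foldl_cons]
    show qs.foldl (pvStepA G R C f) (pvDfsA G R C f q.1 q.2 cur seen) =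
      qs.foldl (pvStepA G R C g) (pvDfsA G R C g q.1 q.2 cur seen)
    rw [h q.1 q.2 cur seen hf hg]
    obtain ⟨new, e2, -, -⟩ := pvDfsA_spec G R C g q.1 q.2 cur seen
    have hm : pvUnseen R C (pvDfsA G R C g q.1 q.2 cur seen).2 ≤ pvUnseen R C seen := by
      rw [e2]
      exact pvUnseen_mono R C seen new
    exact ih (pvDfsA G R C g q.1 q.2 cur seen).1 (pvDfsA G R C g q.1 q.2 cur seen).2
      (by omega) (by omega)

theorem pvDfsA_fuel_eq (G : List (List Int)) (R C : Int) :
    ∀ f g r c cur seen, pvUnseen R C seen < f → pvUnseen R C seen < g →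
    pvDfsA G R C f r c cur seen = pvDfsA G R C g r c cur seen := by
  intro f
  induction f with
  | zero => intro g r c cur seen hf _; omega
  | succ k ih =>
    intro g r c cur seen hf hg
    cases g with
    | zero => omega
    | succ l =>
      by_cases hc : -1 < r ∧ r < R ∧ -1 < c ∧ c < C ∧ pvGv G r c ≠ 0 ∧ (r, c) ∉ seen
      · obtain ⟨b1, b2, b3, b4, hgv, hn⟩ := hc
        have hb : pvInB R C (r, c) = true := by
          simp only [pvInB, decide_eq_true_eq]
          exact ⟨by omega, by omega, by omega, by omega⟩
        rw [pvDfsA_step G R C k r c cur seen hb hgv hn,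
            pvDfsA_step G R C l r c cur seen hb hgv hn]
        have hpos := pvUnseen_pos R C seen (r, c) hb hn
        have hsnoc := pvUnseen_snoc R C seen (r, c) hb hn
        exact pvFoldA_congr G R C k l (fun r' c' cur' seen' h1 h2 => ih l r' c' cur' seen' h1 h2)
          _ _ _ (by omega) (by omega)
      · rw [pvDfsA_skip G R C (k + 1) r c cur seen hc, pvDfsA_skip G R C (l + 1) r c cur seen hc]

-- seen-only step for one flood start
def pvStepS (G : List (List Int)) (R C : Int) (f : Nat)
    (s : PySem.Set (Int × Int)) (p : Int × Int) : PySem.Set (Int × Int) :=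
  (pvDfsA G R C f p.1 p.2 0 s).2

theorem pvFoldl_consIf (R C : Int) :
    ∀ (l rest : List (Int × Int)),
    l.foldl (fun st q => if 0 ≤ q.1 ∧ q.1 < R ∧ 0 ≤ q.2 ∧ q.2 < C then q :: st else st) rest =
      (l.filter (pvInB R C)).reverse ++ rest := by
  intro l
  induction l with
  | nil => intro rest; rfl
  | cons a t ih =>
    intro rest
    rw [List.foldl_cons]
    by_cases hb : 0 ≤ a.1 ∧ a.1 < R ∧ 0 ≤ a.2 ∧ a.2 < C
    · rw [if_pos hb, ih (a :: rest)]
      rw [List.filter_cons_of_pos (by simp [pvInB, hb])]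
      simp [List.append_assoc]
    · rw [if_neg hb, ih rest]
      rw [List.filter_cons_of_neg (by simp [pvInB, hb])]

theorem pvSndFold (G : List (List Int)) (R C : Int) (f : Nat) (qs : List (Int × Int)) :
    ∀ cur seen, (qs.foldl (pvStepA G R C f) (cur, seen)).2 =
      (qs.filter (pvInB R C)).foldl (pvStepS G R C f) seen := by
  induction qs with
  | nil => intro cur seen; rfl
  | cons q qs ih =>
    intro cur seen
    rw [List.foldl_cons]
    by_cases hb : pvInB R C q = true
    · rw [List.filter_cons_of_pos hb, List.foldl_cons]
      show (qs.foldl (pvStepA G R C f) (pvDfsA G R C f q.1 q.2 cur seen)).2 = _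
      rw [pvDfsA_shift G R C f q.1 q.2 cur seen]
      exact ih ((pvDfsA G R C f q.1 q.2 0 seen).1 + cur) (pvDfsA G R C f q.1 q.2 0 seen).2
    · rw [List.filter_cons_of_neg (by simpa using hb)]
      show (qs.foldl (pvStepA G R C f) (pvDfsA G R C f q.1 q.2 cur seen)).2 = _
      rw [pvDfsA_oob G R C f q.1 q.2 cur seen (by simpa using hb)]
      exact ih cur seen

theorem pvFoldS_ext (G : List (List Int)) (R C : Int) (f : Nat) (qs : List (Int × Int)) :
    ∀ seen, ∃ ext, qs.foldl (pvStepS G R C f) seen = seen ++ ext := by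
  induction qs with
  | nil => intro seen; exact ⟨[], by simp⟩
  | cons q qs ih =>
    intro seen
    rw [List.foldl_cons]
    obtain ⟨new, e, -, -⟩ := pvDfsA_spec G R C f q.1 q.2 0 seen
    obtain ⟨ext, he⟩ := ih (pvStepS G R C f seen q)
    refine ⟨new ++ ext, ?_⟩
    rw [he]
    show (pvDfsA G R C f q.1 q.2 0 seen).2 ++ ext = _
    rw [e, List.append_assoc]

theorem pvFoldS_fuel_congr (G : List (List Int)) (R C : Int) (f g : Nat)
    (qs : List (Int × Int)) : ∀ seen, pvUnseen R C seen < f → pvUnseen R C seen < g →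
    qs.foldl (pvStepS G R C f) seen = qs.foldl (pvStepS G R C g) seen := by
  induction qs with
  | nil => intro seen _ _; rfl
  | cons q qs ih =>
    intro seen hf hg
    rw [List.foldl_cons, List.foldl_cons]
    have he : pvStepS G R C f seen q = pvStepS G R C g seen q := by
      show (pvDfsA G R C f q.1 q.2 0 seen).2 = (pvDfsA G R C g q.1 q.2 0 seen).2
      rw [pvDfsA_fuel_eq G R C f g q.1 q.2 0 seen hf hg]
    rw [he]
    obtain ⟨new, e, -, -⟩ := pvDfsA_spec G R C g q.1 q.2 0 seen
    have hm : pvUnseen R C (pvStepS G R C g seen q) ≤ pvUnseen R C seen := by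
      show pvUnseen R C (pvDfsA G R C g q.1 q.2 0 seen).2 ≤ _
      rw [e]
      exact pvUnseen_mono R C seen new
    exact ih (pvStepS G R C g seen q) (by omega) (by omega)

theorem pvNbrs_eq (r c : Int) :
    pvDirs.map (fun d => (r + d.1, c + d.2)) =
      [(r - 1, c), (r, c + 1), (r + 1, c), (r, c - 1)] := by
  simp [pvDirs]
  omega

theorem pvBridge (G : List (List Int)) (R C : Int) :
    ∀ fb (stack : List (Int × Int)) seen fa,
    5 * pvUnseen R C seen + stack.length ≤ fb →
    (∀ p ∈ stack, pvInB R C p = true) →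
    pvUnseen R C seen < fa →
    pvDrain G R C fb stack seen = stack.foldl (pvStepS G R C fa) seen := by
  intro fb
  induction fb with
  | zero =>
    intro stack seen fa hm hs hf
    cases stack with
    | nil => rfl
    | cons p rest => simp at hm
  | succ k ih =>
    intro stack seen fa hm hs hf
    cases stack with
    | nil => rfl
    | cons p rest =>
      have hpin : pvInB R C p = true := hs p List.mem_cons_self
      cases fa with
      | zero => omega
      | succ fa' =>
        rw [List.foldl_cons]
        by_cases hc : pvGv G p.1 p.2 ≠ 0 ∧ p ∉ seen
        · obtain ⟨hgv, hn⟩ := hc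
          have hpos := pvUnseen_pos R C seen p hpin hn
          have hsnoc := pvUnseen_snoc R C seen p hpin hn
          simp only [pvDrain]
          rw [if_pos ⟨hgv, hn⟩]
          rw [pvFoldl_consIf R C _ rest, PySem.Set.add_of_not_mem hn]
          set kept := ([(p.1, p.2 - 1), (p.1 + 1, p.2), (p.1, p.2 + 1), (p.1 - 1, p.2)].filter
            (pvInB R C)).reverse with hkept
          have hlen : kept.length ≤ 4 := by
            rw [hkept, List.length_reverse]
            exact le_trans (List.length_filter_le _ _) (by simp)
          have hlr : (p :: rest).length = rest.length + 1 := rfl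
          have hstep := ih (kept ++ rest) (seen ++ [p]) fa'
            (by rw [List.length_append]; omega)
            (by
              intro x hx
              rcases List.mem_append.1 hx with h | h
              · rw [hkept] at h
                exact (List.mem_filter.1 (List.mem_reverse.1 h)).2
              · exact hs x (List.mem_cons_of_mem p h))
            (by omega)
          rw [hstep, List.foldl_append]
          have hrhs : pvStepS G R C (fa' + 1) seen p = kept.foldl (pvStepS G R C fa') (seen ++ [p]) := by
            show (pvDfsA G R C (fa' + 1) p.1 p.2 0 seen).2 = _
            rw [show p = (p.1, p.2) from rfl] at hpin
            rw [pvDfsA_step G R C fa' p.1 p.2 0 seen hpin hgv hn]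
            rw [pvSndFold G R C fa' _ (0 + pvGv G p.1 p.2) (seen ++ [(p.1, p.2)])]
            rw [pvNbrs_eq p.1 p.2, hkept, ← List.filter_reverse]
            rfl
          rw [hrhs]
          obtain ⟨ext, hext⟩ := pvFoldS_ext G R C fa' kept (seen ++ [p])
          have humono : pvUnseen R C (kept.foldl (pvStepS G R C fa') (seen ++ [p])) ≤
              pvUnseen R C (seen ++ [p]) := by
            rw [hext]
            have := pvUnseen_mono R C (seen ++ [p]) ext
            simpa [List.append_assoc] using this
          exact pvFoldS_fuel_congr G R C fa' (fa' + 1) rest _ (by omega) (by omega)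
        · simp only [pvDrain]
          rw [if_neg hc]
          have hseen : pvStepS G R C (fa' + 1) seen p = seen := by
            show (pvDfsA G R C (fa' + 1) p.1 p.2 0 seen).2 = seen
            rw [pvDfsA_skip G R C (fa' + 1) p.1 p.2 0 seen
              (fun h => hc ⟨h.2.2.2.2.1, h.2.2.2.2.2⟩)]
          rw [hseen]
          have hlr : (p :: rest).length = rest.length + 1 := rfl
          exact ih rest seen (fa' + 1) (by omega)
            (fun x hx => hs x (List.mem_cons_of_mem p hx)) hf


-- outer-loop step functions (bodies of the ports' cell loops)
def pvStepOutA (G : List (List Int)) (R C : Int) (fa : Nat)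
    (st : Int × Int × PySem.Set (Int × Int)) (p : Int × Int) : Int × Int × PySem.Set (Int × Int) :=
  if pvGv G p.1 p.2 ≠ 0 ∧ p ∉ st.2.2 then
    let q := pvDfsA G R C fa p.1 p.2 0 st.2.2
    (st.1 + q.1, st.2.1 + 1, q.2)
  else st

def pvStepOutB (G : List (List Int)) (R C : Int) (fbn : Nat)
    (st : Int × PySem.Set (Int × Int)) (p : Int × Int) : Int × PySem.Set (Int × Int) :=
  if pvGv G p.1 p.2 ≠ 0 ∧ p ∉ st.2 then (st.1 + 1, pvDrain G R C fbn [p] st.2) else st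

theorem pvNested {σ : Type} (F : σ → (Int × Int) → σ) (R C : Int) (init : σ) :
    (PySem.List.pyRange 0 R 1).foldl (fun st r =>
        (PySem.List.pyRange 0 C 1).foldl (fun st c => F st (r, c)) st) init =
      (pvRegion R C).foldl F init := by
  unfold pvRegion
  rw [List.foldl_flatMap]
  simp only [List.foldl_map]

theorem pvSumG_append (G : List (List Int)) (l1 l2 : List (Int × Int)) :
    pvSumG G (l1 ++ l2) = pvSumG G l1 + pvSumG G l2 := by
  simp [pvSumG]

theorem pvFoldSum (G : List (List Int)) (l : List (Int × Int)) :
    ∀ init : Int, l.foldl (fun t p => t + pvGv G p.1 p.2) init = init + pvSumG G l := by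
  induction l with
  | nil => intro init; simp [pvSumG]
  | cons p l ih =>
    intro init
    rw [List.foldl_cons, ih]
    simp [pvSumG]
    ring

theorem pvSumG_dropzero (G : List (List Int)) (l : List (Int × Int)) :
    pvSumG G l = pvSumG G (l.filter (fun p => decide (pvGv G p.1 p.2 ≠ 0))) := by
  induction l with
  | nil => rfl
  | cons p l ih =>
    by_cases h : pvGv G p.1 p.2 ≠ 0
    · rw [List.filter_cons_of_pos (by simpa using h)]
      simp only [pvSumG, List.map_cons, List.sum_cons] at *
      omega
    · rw [List.filter_cons_of_neg (by simpa using h)]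
      simp only [pvSumG, List.map_cons, List.sum_cons] at *
      have h0 : pvGv G p.1 p.2 = 0 := by omega
      rw [h0, ih]
      ring

theorem pvOuterInv (G : List (List Int)) (R C : Int) (fa fbn : Nat)
    (hfa : R.toNat * C.toNat < fa) (hfb : 5 * (R.toNat * C.toNat) + 2 ≤ fbn) :
    ∀ (L : List (Int × Int)), (∀ p ∈ L, pvInB R C p = true) →
    ∀ (res N : Int) (seen : PySem.Set (Int × Int)),
    seen.Nodup → (∀ p ∈ seen, pvInB R C p = true ∧ pvGv G p.1 p.2 ≠ 0) →
    res = pvSumG G seen →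
    (L.foldl (pvStepOutB G R C fbn) (N, seen) =
        ((L.foldl (pvStepOutA G R C fa) (res, N, seen)).2.1,
         (L.foldl (pvStepOutA G R C fa) (res, N, seen)).2.2)) ∧
    (L.foldl (pvStepOutA G R C fa) (res, N, seen)).1 =
        pvSumG G (L.foldl (pvStepOutA G R C fa) (res, N, seen)).2.2 ∧
    (L.foldl (pvStepOutA G R C fa) (res, N, seen)).2.2.Nodup ∧
    (∀ p ∈ (L.foldl (pvStepOutA G R C fa) (res, N, seen)).2.2,
        pvInB R C p = true ∧ pvGv G p.1 p.2 ≠ 0) ∧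
    (∃ ext, (L.foldl (pvStepOutA G R C fa) (res, N, seen)).2.2 = seen ++ ext) ∧
    (∀ p ∈ L, pvGv G p.1 p.2 ≠ 0 → p ∈ (L.foldl (pvStepOutA G R C fa) (res, N, seen)).2.2) := by
  intro L
  induction L with
  | nil =>
    intro _ res N seen hnd hsound hres
    exact ⟨rfl, hres, hnd, hsound, ⟨[], by simp⟩, by simp⟩
  | cons p L ih =>
    intro hL res N seen hnd hsound hres
    have hpin : pvInB R C p = true := hL p List.mem_cons_self
    have hLt : ∀ x ∈ L, pvInB R C x = true := fun x hx => hL x (List.mem_cons_of_mem p hx)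
    rw [List.foldl_cons, List.foldl_cons]
    by_cases hc : pvGv G p.1 p.2 ≠ 0 ∧ p ∉ seen
    · obtain ⟨hgv, hn⟩ := hc
      have hA : pvStepOutA G R C fa (res, N, seen) p =
          (res + (pvDfsA G R C fa p.1 p.2 0 seen).1, N + 1, (pvDfsA G R C fa p.1 p.2 0 seen).2) := by
        unfold pvStepOutA
        rw [if_pos ⟨hgv, hn⟩]
      have hu : pvUnseen R C seen ≤ R.toNat * C.toNat := pvUnseen_le R C seen
      have hBr : pvDrain G R C fbn [p] seen = (pvDfsA G R C fa p.1 p.2 0 seen).2 := by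
        rw [pvBridge G R C fbn [p] seen fa (by simp; omega) (by intro x hx; simp at hx; subst hx; exact hpin) (by omega)]
        rfl
      have hB : pvStepOutB G R C fbn (N, seen) p =
          (N + 1, (pvDfsA G R C fa p.1 p.2 0 seen).2) := by
        unfold pvStepOutB
        rw [if_pos ⟨hgv, hn⟩, hBr]
      obtain ⟨new, e, hgood, hnodup⟩ := pvDfsA_spec G R C fa p.1 p.2 0 seen
      have e1 : (pvDfsA G R C fa p.1 p.2 0 seen).1 = pvSumG G new := by rw [e]; simp
      have e2 : (pvDfsA G R C fa p.1 p.2 0 seen).2 = seen ++ new := by rw [e]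
      have hres' : res + (pvDfsA G R C fa p.1 p.2 0 seen).1 =
          pvSumG G (pvDfsA G R C fa p.1 p.2 0 seen).2 := by
        rw [e1, e2, pvSumG_append, hres]
      have hsound' : ∀ x ∈ (pvDfsA G R C fa p.1 p.2 0 seen).2,
          pvInB R C x = true ∧ pvGv G x.1 x.2 ≠ 0 := by
        intro x hx
        rw [e2] at hx
        rcases List.mem_append.1 hx with h | h
        · exact hsound x h
        · obtain ⟨h1, h2, -⟩ := hgood x h
          exact ⟨h1, h2⟩
      have hnd' : (pvDfsA G R C fa p.1 p.2 0 seen).2.Nodup := by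
        rw [e2]; exact hnodup hnd
      have hself : p ∈ (pvDfsA G R C fa p.1 p.2 0 seen).2 := by
        have := pvDfsA_mem_self G R C fa p.1 p.2 0 seen (by omega) hpin hgv hn
        simpa using this
      rw [hA, hB]
      obtain ⟨hBB, hsum, hnod, hsnd, ⟨ext, hext⟩, hcomp⟩ :=
        ih hLt (res + (pvDfsA G R C fa p.1 p.2 0 seen).1) (N + 1)
          (pvDfsA G R C fa p.1 p.2 0 seen).2 hnd' hsound' hres'
      refine ⟨hBB, hsum, hnod, hsnd, ?_, ?_⟩
      · refine ⟨new ++ ext, ?_⟩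
        rw [hext, e2, List.append_assoc]
      · intro x hx hgx
        rcases List.mem_cons.1 hx with rfl | hxL
        · rw [hext]
          exact List.mem_append_left _ hself
        · exact hcomp x hxL hgx
    · have hA : pvStepOutA G R C fa (res, N, seen) p = (res, N, seen) := by
        unfold pvStepOutA
        rw [if_neg hc]
      have hB : pvStepOutB G R C fbn (N, seen) p = (N, seen) := by
        unfold pvStepOutB
        rw [if_neg hc]
      rw [hA, hB]
      obtain ⟨hBB, hsum, hnod, hsnd, ⟨ext, hext⟩, hcomp⟩ :=
        ih hLt res N seen hnd hsound hres
      refine ⟨hBB, hsum, hnod, hsnd, ⟨ext, hext⟩, ?_⟩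
      intro x hx hgx
      rcases List.mem_cons.1 hx with rfl | hxL
      · have hxseen : x ∈ seen := by
          by_contra hns
          exact hc ⟨hgx, hns⟩
        rw [hext]
        exact List.mem_append_left _ hxseen
      · exact hcomp x hxL hgx

-- ===== VERDICT (by name: the statement is the Claim_ definition above) =====
theorem way1_spec : Claim_equal_way1 := by
  intro G _hd _hp
  unfold Spec_way1
  show way1 G = way1_alt G
  simp only [way1, way1_alt]
  have hfa : ((G.length : Int)).toNat * (((G.headD []).length : Int)).toNat <
      G.length * (G.headD []).length + 1 := by simp
  have hfb : 5 * (((G.length : Int)).toNat * (((G.headD []).length : Int)).toNat) + 2 ≤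
      5 * (G.length * (G.headD []).length) + 2 := by simp
  have eA : List.foldl
      (fun st r => List.foldl
        (fun (st : Int × Int × PySem.Set (Int × Int)) c =>
          if pvGv G r c ≠ 0 ∧ (r, c) ∉ st.2.2 then
            (st.1 + (pvDfsA G (G.length : Int) ((G.headD []).length : Int)
                (G.length * (G.headD []).length + 1) r c 0 st.2.2).1,
             st.2.1 + 1,
             (pvDfsA G (G.length : Int) ((G.headD []).length : Int)
                (G.length * (G.headD []).length + 1) r c 0 st.2.2).2)
          else st)
        st (PySem.List.pyRange 0 ((G.headD []).length : Int) 1))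
      ((0 : Int), (0 : Int), ([] : PySem.Set (Int × Int))) (PySem.List.pyRange 0 (G.length : Int) 1)
    = (pvRegion (G.length : Int) ((G.headD []).length : Int)).foldl
        (pvStepOutA G (G.length : Int) ((G.headD []).length : Int)
          (G.length * (G.headD []).length + 1)) (0, 0, []) :=
    pvNested (pvStepOutA G (G.length : Int) ((G.headD []).length : Int)
      (G.length * (G.headD []).length + 1)) (G.length : Int) ((G.headD []).length : Int) (0, 0, [])
  have eB : List.foldl
      (fun st r => List.foldl
        (fun (st : Int × PySem.Set (Int × Int)) c =>
          if pvGv G r c ≠ 0 ∧ (r, c) ∉ st.2 then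
            (st.1 + 1, pvDrain G (G.length : Int) ((G.headD []).length : Int)
              (5 * (G.length * (G.headD []).length) + 2) [(r, c)] st.2)
          else st)
        st (PySem.List.pyRange 0 ((G.headD []).length : Int) 1))
      ((0 : Int), ([] : PySem.Set (Int × Int))) (PySem.List.pyRange 0 (G.length : Int) 1)
    = (pvRegion (G.length : Int) ((G.headD []).length : Int)).foldl
        (pvStepOutB G (G.length : Int) ((G.headD []).length : Int)
          (5 * (G.length * (G.headD []).length) + 2)) (0, []) :=
    pvNested (pvStepOutB G (G.length : Int) ((G.headD []).length : Int)
      (5 * (G.length * (G.headD []).length) + 2)) (G.length : Int) ((G.headD []).length : Int) (0, [])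
  have eT : List.foldl
      (fun t r => List.foldl (fun (t : Int) c => t + pvGv G r c)
        t (PySem.List.pyRange 0 ((G.headD []).length : Int) 1))
      (0 : Int) (PySem.List.pyRange 0 (G.length : Int) 1)
    = (pvRegion (G.length : Int) ((G.headD []).length : Int)).foldl
        (fun t p => t + pvGv G p.1 p.2) 0 :=
    pvNested (fun t p => t + pvGv G p.1 p.2) (G.length : Int) ((G.headD []).length : Int) 0
  rw [eA, eB, eT]
  obtain ⟨hBB, hsum, hnod, hsnd, -, hcomp⟩ :=
    pvOuterInv G (G.length : Int) ((G.headD []).length : Int)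
      (G.length * (G.headD []).length + 1) (5 * (G.length * (G.headD []).length) + 2) hfa hfb
      (pvRegion (G.length : Int) ((G.headD []).length : Int))
      (fun p hp => (mem_pvRegion _ _ p).1 hp) 0 0 []
      (by simp) (by simp) (by simp [pvSumG])
  rw [hBB, hsum, pvFoldSum G _ 0, zero_add]
  have hperm : ((pvRegion (G.length : Int) ((G.headD []).length : Int)).filter
      (fun p => decide (pvGv G p.1 p.2 ≠ 0))).Perm
      ((pvRegion (G.length : Int) ((G.headD []).length : Int)).foldl
        (pvStepOutA G (G.length : Int) ((G.headD []).length : Int)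
          (G.length * (G.headD []).length + 1)) (0, 0, [])).2.2 := by
    apply (List.perm_ext_iff_of_nodup (List.Nodup.filter _ (nodup_pvRegion _ _)) hnod).mpr
    intro x
    constructor
    · intro hx
      obtain ⟨hxr, hxg⟩ := List.mem_filter.1 hx
      exact hcomp x hxr (by simpa using hxg)
    · intro hx
      obtain ⟨hinB, hgv⟩ := hsnd x hx
      exact List.mem_filter.2 ⟨(mem_pvRegion _ _ x).2 hinB, by simpa using hgv⟩
  have hsums : pvSumG G ((pvRegion (G.length : Int) ((G.headD []).length : Int)).foldl
      (pvStepOutA G (G.length : Int) ((G.headD []).length : Int)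
        (G.length * (G.headD []).length + 1)) (0, 0, [])).2.2 =
      pvSumG G (pvRegion (G.length : Int) ((G.headD []).length : Int)) := by
    rw [pvSumG_dropzero G (pvRegion (G.length : Int) ((G.headD []).length : Int))]
    exact (List.Perm.sum_eq (hperm.map _)).symm
  rw [hsums]
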